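-- pv_equiv track=rewrite | github.com/PyDarren/PLT_back | FCS5/FCS.py | check_list_equally
-- ===== SOURCE A (Python) =====
-- def check_list_equally(my_list):
--     my_list = [element for element in my_list if element is not None]
--     iterator = iter(my_list)
--     try:
--         first = next(iterator)
--     except StopIteration:
--         return True
--     return all(first == rest for rest in iterator)
-- ===== SOURCE B (Python) =====
-- def check_list_equally(my_list):
--     return len({element for element in my_list if element is not None}) <= 1
-- ===== Notes on version B (the rewrite author's own statement) =====
-- stated objective: idiomatic
-- what changed: Instead of comparing every later element against the first non-None element, B collects the distinct non-None values into a set and checks that its cardinality is at most 1.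
import Mathlib
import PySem

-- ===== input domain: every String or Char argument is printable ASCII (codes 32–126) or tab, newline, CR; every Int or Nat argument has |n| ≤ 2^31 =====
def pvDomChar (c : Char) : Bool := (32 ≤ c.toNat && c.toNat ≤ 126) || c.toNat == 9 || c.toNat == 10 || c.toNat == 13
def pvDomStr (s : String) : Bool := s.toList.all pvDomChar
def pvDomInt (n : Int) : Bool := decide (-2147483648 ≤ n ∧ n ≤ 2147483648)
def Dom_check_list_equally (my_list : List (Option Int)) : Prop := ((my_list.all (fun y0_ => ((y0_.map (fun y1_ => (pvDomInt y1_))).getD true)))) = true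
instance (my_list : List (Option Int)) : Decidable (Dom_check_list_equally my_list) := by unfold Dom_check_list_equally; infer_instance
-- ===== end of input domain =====

-- B replaces A's compare-each-to-the-first scan by collecting the distinct non-None values into a set and checking its cardinality is ≤ 1 (idiomatic; same cost).
-- ===== PORT A =====
-- A: filter out None, take the first, then all(first == rest) over the remainder
def check_list_equally (my_list : List (Option Int)) : Bool :=
  let filtered := my_list.filter (fun element => element ≠ none)
  match filtered with
  | [] => true
  | first :: rest => rest.all (fun r => first == r)

-- ===== PORT B =====
-- B: len({element for element in my_list if element is not None}) <= 1
def check_list_equally_alt (my_list : List (Option Int)) : Bool :=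
  decide (PySem.Set.len (PySem.Set.ofList (my_list.filter (fun element => element ≠ none))) ≤ 1)

-- ===== PRECONDITION & SPEC =====
def Spec_check_list_equally (my_list : List (Option Int)) (out : Bool) : Prop := out = check_list_equally_alt my_list
instance (my_list : List (Option Int)) (out : Bool) : Decidable (Spec_check_list_equally my_list out) := by unfold Spec_check_list_equally; infer_instance

-- ===== CLAIM (what is proved, stated in full; the proofs are below) =====
def Claim_equal_check_list_equally : Prop := ∀ (my_list : List (Option Int)), Dom_check_list_equally my_list → Spec_check_list_equally my_list (check_list_equally my_list)

-- ===== LEMMAS AND PROOFS =====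

-- adding to a set never shrinks it
lemma pvLen_le_foldl_add (acc : PySem.Set (Option Int)) (l : List (Option Int)) :
    acc.length ≤ (l.foldl PySem.Set.add acc).length := by
  induction l generalizing acc with
  | nil => simp
  | cons x t ih =>
    refine le_trans ?_ (ih (PySem.Set.add acc x))
    unfold PySem.Set.add
    split <;> simp

-- once the first element f is in the set, the remaining fold stays at {f} iff every element equals f
lemma pvFold_singleton (f : Option Int) (r : List (Option Int)) :
    (decide ((r.foldl PySem.Set.add [f]).length ≤ 1)) = r.all (fun x => f == x) := by
  induction r with
  | nil => simp
  | cons x t ih =>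
    by_cases hfx : f = x
    · subst hfx
      simpa [List.foldl_cons, PySem.Set.add, PySem.Set.contains] using ih
    · have hx : PySem.Set.add [f] x = [f, x] := by
        simp [PySem.Set.add, PySem.Set.contains]
        exact fun h => hfx h.symm
      have h2 : ¬ (t.foldl PySem.Set.add [f, x]).length ≤ 1 := by
        have hlen : 2 ≤ (t.foldl PySem.Set.add [f, x]).length := by
          simpa using pvLen_le_foldl_add [f, x] t
        omega
      simp [List.foldl_cons, hx, h2, List.all_cons, hfx]

-- ===== VERDICT (by name: the statement is the Claim_ definition above) =====
theorem check_list_equally_spec : Claim_equal_check_list_equally := by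
  intro l _
  unfold Spec_check_list_equally check_list_equally check_list_equally_alt
  simp only [PySem.Set.len, PySem.Set.ofList_eq_foldl]
  cases h : l.filter (fun element => element ≠ none) with
  | nil => simp
  | cons f r =>
    have : (f :: r).foldl PySem.Set.add [] = r.foldl PySem.Set.add [f] := by
      simp [List.foldl_cons, PySem.Set.add, PySem.Set.contains]
    simp [this, pvFold_singleton]
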